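-- pv_equiv track=rewrite | github.com/huijz333/ENSIIE | Bordel/tp1Pile/exo.py | duppliquer
-- ===== SOURCE A (Python) =====
-- def creer_pile():
--     pile = []
--     return pile
--
-- def est_vide(p):
--     return len(p) == 0
--
-- def empiler(p, x):
--     p.append(x)
--
-- def depiler(p):
--     return p.pop()
--
-- def duppliquer(p):
--     copy = creer_pile() # pile temporaire
--     q = creer_pile()    # duplicat de 'p'
--
--     # algorithm: on depile 'p' dans 'copy'
--     while not est_vide(p):
--         empiler(copy, depiler(p))
--
--     # puis on depile 'copy' dans 'p' et 'q'
--     while not est_vide(copy):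
--         x = depiler(copy)
--         empiler(p, x)
--         empiler(q, x)
--
--     # on renvoie le duplicat de 'p'
--     return q
-- ===== SOURCE B (Python) =====
-- def duppliquer(p):
--     # Direct one-forward-pass copy; no temporary stack, no double reversal.
--     q = []
--     for x in p:
--         q.append(x)
--     return q
-- ===== Notes on version B (the rewrite author's own statement) =====
-- stated objective: simpler
-- what changed: B replaces A's two while-loops (unstack p into a temporary stack, then restack into p and q) with a single forward pass appending each element of p to a fresh list.
import Mathlib
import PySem

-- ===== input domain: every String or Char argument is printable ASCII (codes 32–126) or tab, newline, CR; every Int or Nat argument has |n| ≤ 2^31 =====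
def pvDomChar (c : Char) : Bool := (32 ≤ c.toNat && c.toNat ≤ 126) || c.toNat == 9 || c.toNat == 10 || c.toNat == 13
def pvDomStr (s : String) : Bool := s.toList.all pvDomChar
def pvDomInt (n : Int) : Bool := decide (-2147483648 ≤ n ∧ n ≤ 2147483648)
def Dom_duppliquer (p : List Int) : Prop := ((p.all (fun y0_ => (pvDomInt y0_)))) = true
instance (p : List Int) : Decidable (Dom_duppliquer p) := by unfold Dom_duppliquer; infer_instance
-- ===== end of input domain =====

-- B builds the copy in one forward pass instead of A's pop-everything-twice round trip (objective: simpler).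
-- A mutates its argument in place (empties it, then restores it to the same contents); the equivalence proved
-- here is about the RETURN value only.

-- ===== PORT A =====
-- while not est_vide(p): empiler(copy, depiler(p))   -- stack = Lean list, top = last element
def duppliquerLoop1 (p copy : List Int) : List Int × List Int :=
  if h : p = [] then (p, copy)
  else duppliquerLoop1 p.dropLast (copy ++ [p.getLast h])
termination_by p.length
decreasing_by simp [List.length_dropLast]; exact List.length_pos_iff.mpr h

-- while not est_vide(copy): x = depiler(copy); empiler(p, x); empiler(q, x)
def duppliquerLoop2 (copy p q : List Int) : List Int × List Int × List Int :=
  if h : copy = [] then (copy, p, q)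
  else duppliquerLoop2 copy.dropLast (p ++ [copy.getLast h]) (q ++ [copy.getLast h])
termination_by copy.length
decreasing_by simp [List.length_dropLast]; exact List.length_pos_iff.mpr h

def duppliquer (p : List Int) : List Int :=
  let copy : List Int := []
  let q : List Int := []
  let r1 := duppliquerLoop1 p copy
  let r2 := duppliquerLoop2 r1.2 r1.1 q
  r2.2.2

-- ===== PORT B =====
def duppliquer_alt (p : List Int) : List Int :=
  p.foldl (fun q x => q ++ [x]) []

-- ===== PRECONDITION & SPEC =====
def Spec_duppliquer (p : List Int) (out : List Int) : Prop := out = duppliquer_alt p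
instance (p : List Int) (out : List Int) : Decidable (Spec_duppliquer p out) := by unfold Spec_duppliquer; infer_instance

-- ===== CLAIM (what is proved, stated in full; the proofs are below) =====
def Claim_equal_duppliquer : Prop := ∀ (p : List Int), Dom_duppliquer p → Spec_duppliquer p (duppliquer p)

-- ===== LEMMAS AND PROOFS =====
theorem duppliquerLoop1_eq (p copy : List Int) :
    duppliquerLoop1 p copy = ([], copy ++ p.reverse) := by
  induction p using List.reverseRecOn generalizing copy with
  | nil => simp [duppliquerLoop1]
  | append_singleton xs x ih =>
      rw [duppliquerLoop1]
      simp [ih]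

theorem duppliquerLoop2_eq (copy p q : List Int) :
    duppliquerLoop2 copy p q = ([], p ++ copy.reverse, q ++ copy.reverse) := by
  induction copy using List.reverseRecOn generalizing p q with
  | nil => simp [duppliquerLoop2]
  | append_singleton xs x ih =>
      rw [duppliquerLoop2]
      simp [ih]

theorem duppliquer_alt_eq (p : List Int) : duppliquer_alt p = p := by
  unfold duppliquer_alt
  suffices h : ∀ acc : List Int, p.foldl (fun q x => q ++ [x]) acc = acc ++ p by
    simpa using h []
  induction p with
  | nil => simp
  | cons x xs ih => intro acc; simp [ih]

-- ===== VERDICT (by name: the statement is the Claim_ definition above) =====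
theorem duppliquer_spec : Claim_equal_duppliquer := by
  intro p _
  unfold Spec_duppliquer duppliquer
  simp [duppliquerLoop1_eq, duppliquerLoop2_eq, duppliquer_alt_eq]
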